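-- pv_equiv track=rewrite | github.com/sony/jys | dataset.py | check_err
-- ===== SOURCE A (Python) =====
-- def check_err(sample, err, prev_number=None):
--     assert isinstance(sample, list)
--
--     if len(sample) == 0:
--         return err
--
--     elif prev_number is None:
--         prev_number = sample.pop(0)
--         err.append(True)
--         return check_err(sample, err, prev_number)
--
--     else:
--         curr_number = sample.pop(0)
--         if prev_number == 0:
--             err.append(True)
--         else:
--             err.append(prev_number - 1 == curr_number)
--             curr_number = 0
--         return check_err(sample, err, prev_number=curr_number)
-- ===== SOURCE B (Python) =====
-- def check_err(sample, err, prev_number=None):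
--     # Iterative single pass over sample by index (no recursion, no pop(0)).
--     # Performs the same mutations as A: empties sample, extends err in place.
--     out = []
--     prev = prev_number
--     for x in sample:
--         if prev is None or prev == 0:
--             out.append(True)
--             prev = x
--         else:
--             out.append(prev - 1 == x)
--             prev = 0
--     sample.clear()
--     err.extend(out)
--     return err
-- ===== Notes on version B (the rewrite author's own statement) =====
-- stated objective: faster
-- what changed: Replaces recursion with pop(0) (linear-time per step) by a single iterative pass over the list with an alternating prev-state, appending to a local output list.
import Mathlib
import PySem

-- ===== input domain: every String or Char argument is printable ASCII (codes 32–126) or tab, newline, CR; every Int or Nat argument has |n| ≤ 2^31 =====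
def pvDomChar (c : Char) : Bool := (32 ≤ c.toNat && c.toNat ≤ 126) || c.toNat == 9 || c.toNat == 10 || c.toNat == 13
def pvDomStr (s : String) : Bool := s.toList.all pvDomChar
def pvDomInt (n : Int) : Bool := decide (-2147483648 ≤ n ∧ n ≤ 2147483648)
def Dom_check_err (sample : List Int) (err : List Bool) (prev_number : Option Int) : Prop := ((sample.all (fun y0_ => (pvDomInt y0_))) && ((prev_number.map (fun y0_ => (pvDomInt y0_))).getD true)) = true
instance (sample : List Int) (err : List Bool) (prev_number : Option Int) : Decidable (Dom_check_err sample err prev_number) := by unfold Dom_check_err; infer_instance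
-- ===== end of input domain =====

-- B replaces A's recursion + pop(0) with one iterative pass (asymptotically faster); A and B mutate sample/err in place identically; the equivalence proved is about the return value.


-- ===== PORT A =====
-- Port of A: recursion on sample (pop(0) = head), appending to err each step.
def check_err (sample : List Int) (err : List Bool) (prev_number : Option Int) : List Bool :=
  match sample with
  | [] => err
  | x :: rest =>
    match prev_number with
    | none => check_err rest (err ++ [true]) (some x)
    | some p =>
      if p = 0 then check_err rest (err ++ [true]) (some x)
      else check_err rest (err ++ [decide (p - 1 = x)]) (some 0)

-- ===== PORT B =====
-- Port of B: one left fold over sample with state (out, prev), then err ++ out.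
def pyStep (st : List Bool × Option Int) (x : Int) : List Bool × Option Int :=
  match st.2 with
  | none => (st.1 ++ [true], some x)
  | some p =>
    if p = 0 then (st.1 ++ [true], some x)
    else (st.1 ++ [decide (p - 1 = x)], some 0)

def check_err_alt (sample : List Int) (err : List Bool) (prev_number : Option Int) : List Bool :=
  err ++ (sample.foldl pyStep ([], prev_number)).1

-- ===== PRECONDITION & SPEC =====
def Spec_check_err (sample : List Int) (err : List Bool) (prev_number : Option Int) (out : List Bool) : Prop := out = check_err_alt sample err prev_number
instance (sample : List Int) (err : List Bool) (prev_number : Option Int) (out : List Bool) : Decidable (Spec_check_err sample err prev_number out) := by unfold Spec_check_err; infer_instance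

-- ===== CLAIM (what is proved, stated in full; the proofs are below) =====
def Claim_equal_check_err : Prop := ∀ (sample : List Int) (err : List Bool) (prev_number : Option Int), Dom_check_err sample err prev_number → Spec_check_err sample err prev_number (check_err sample err prev_number)

-- ===== LEMMAS AND PROOFS =====
-- the fold's output component distributes over a prefix of the accumulator
theorem foldl_fst_append (sample : List Int) (a : List Bool) (b : List Bool) (p : Option Int) :
    (sample.foldl pyStep (a ++ b, p)).1 = a ++ (sample.foldl pyStep (b, p)).1 := by
  induction sample generalizing b p with
  | nil => simp
  | cons x rest ih =>
    cases p with
    | none => simpa [List.foldl, pyStep] using ih (b ++ [true]) (some x)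
    | some q =>
      by_cases h : q = 0 <;>
        simp [List.foldl, pyStep, h, ih]

-- specialisation: the fold's output starts with its initial accumulator
theorem foldl_fst (sample : List Int) (a : List Bool) (p : Option Int) :
    (sample.foldl pyStep (a, p)).1 = a ++ (sample.foldl pyStep ([], p)).1 := by
  simpa using foldl_fst_append sample a [] p

theorem check_err_main (sample : List Int) (err : List Bool) (p : Option Int) :
    check_err sample err p = err ++ (sample.foldl pyStep ([], p)).1 := by
  induction sample generalizing err p with
  | nil => simp [check_err]
  | cons x rest ih =>
    cases p with
    | none =>
      simp only [check_err, List.foldl, pyStep, ih, List.nil_append]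
      rw [foldl_fst rest [true] (some x)]; simp
    | some q =>
      by_cases h : q = 0 <;> simp only [check_err, List.foldl, pyStep, h, ih, if_true, if_false, List.nil_append]
      · rw [foldl_fst rest [true] (some x)]; simp
      · rw [foldl_fst rest [decide (q - 1 = x)] (some 0)]; simp

-- ===== VERDICT =====
theorem check_err_spec : Claim_equal_check_err := by
  intro sample err p _
  unfold Spec_check_err check_err_alt
  exact check_err_main sample err p
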